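-- pv_equiv track=rewrite | github.com/inetuid/ndca | yandc/mikrotik.py | print_concat
-- ===== SOURCE A (Python) =====
-- def print_concat(print_output):
-- 	concat_output = []
-- 	for line in print_output:
-- 		if len(line) == 0:
-- 			continue
-- 		if line.startswith('   '):
-- 			concat_output[-1] = ' '.join([concat_output[-1], line.strip()])
-- 		else:
-- 			if line.find(';;; ') != -1:
-- 				line = line.replace(';;; ', 'comment=')
-- 			concat_output.append(line.strip())
-- 	return concat_output
-- ===== SOURCE B (Python) =====
-- def print_concat(print_output):
--     lines = [l for l in print_output if l != '']
--     records = []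
--     i = 0
--     n = len(lines)
--     while i < n:
--         header = lines[i].replace(';;; ', 'comment=').strip()
--         j = i + 1
--         parts = [header]
--         while j < n and lines[j].startswith('   '):
--             parts.append(lines[j].strip())
--             j += 1
--         records.append(' '.join(parts))
--         i = j
--     return records
-- ===== Notes on version B (the rewrite author's own statement) =====
-- stated objective: alternative
-- what changed: B first filters out empty lines, then consumes the list record-by-record with a two-pointer span scan (each header grabs its whole contiguous run of continuation lines at once and is joined once), instead of A's single fold that rewrites the last element of the output list on every continuation line; B also drops A's redundant find-guard around str.replace.
import Mathlib
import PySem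

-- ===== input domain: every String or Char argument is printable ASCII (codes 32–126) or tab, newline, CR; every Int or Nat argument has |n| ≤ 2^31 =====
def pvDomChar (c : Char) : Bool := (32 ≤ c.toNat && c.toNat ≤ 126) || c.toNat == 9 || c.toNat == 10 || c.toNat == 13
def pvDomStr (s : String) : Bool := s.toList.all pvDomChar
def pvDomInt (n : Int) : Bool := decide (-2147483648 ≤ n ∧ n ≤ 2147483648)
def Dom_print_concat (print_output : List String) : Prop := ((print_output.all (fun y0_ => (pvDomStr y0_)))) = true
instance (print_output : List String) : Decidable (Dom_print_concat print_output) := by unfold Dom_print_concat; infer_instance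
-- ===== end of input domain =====

-- B filters empty lines, then scans record-by-record: each header grabs its whole contiguous run
-- of continuation lines and is joined once, instead of A's fold rewriting the last output string.

-- ===== PORT A =====
-- loop body of A; `concat_output[-1] = ...` raises IndexError when the list is empty — that
-- input is excluded by Pre_print_concat below; the port leaves the state unchanged there.
def pvStepA (acc : List String) (line : String) : List String :=
  if PySem.Str.len line = 0 then acc
  else if PySem.Str.startswith line "   " then
    match acc.getLast? with
    | none => acc
    | some last => acc.dropLast ++ [PySem.Str.join " " [last, PySem.Str.strip line]]
  else
    let line' := if PySem.Str.find line ";;; " ≠ -1 then PySem.Str.replace line ";;; " "comment=" else line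
    acc ++ [PySem.Str.strip line']

def print_concat (print_output : List String) : List String :=
  print_output.foldl pvStepA []

-- ===== PORT B =====
-- B's outer while-loop over the filtered lines: each step takes the header plus the contiguous
-- run of continuation lines (the inner while = takeWhile), joins them, and continues after the run.
def pvContinues (l : String) : Bool := PySem.Str.startswith l "   "

def pvRecords : List String → List String
  | [] => []
  | line :: rest =>
      let header := PySem.Str.strip (PySem.Str.replace line ";;; " "comment=")
      PySem.Str.join " " (header :: (rest.takeWhile pvContinues).map PySem.Str.strip)
        :: pvRecords (rest.dropWhile pvContinues)
  termination_by ls => ls.length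
  decreasing_by
    simpa using Nat.lt_succ_of_le (List.length_dropWhile_le _ _)

def print_concat_alt (print_output : List String) : List String :=
  pvRecords (print_output.filter (fun l => l ≠ ""))

-- ===== PRECONDITION & SPEC =====
-- Pre_ excludes exactly the inputs on which the Python A raises IndexError: those whose first
-- non-empty line is a continuation line (starts with three spaces).
def Pre_print_concat (print_output : List String) : Prop :=
  ((print_output.filter (fun l => l ≠ "")).head?.all
    (fun s => ¬ PySem.Str.startswith s "   ")) = true
instance (print_output : List String) : Decidable (Pre_print_concat print_output) := by
  unfold Pre_print_concat; infer_instance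

def pvWitness_print_concat : List String := ["interface=ether1", "   comment=x", ";;; note", ""]

def Spec_print_concat (print_output : List String) (out : List String) : Prop := out = print_concat_alt print_output
instance (print_output : List String) (out : List String) : Decidable (Spec_print_concat print_output out) := by unfold Spec_print_concat; infer_instance

-- ===== CLAIM (what is proved, stated in full; the proofs are below) =====
def Claim_equal_print_concat : Prop := ∀ (print_output : List String), Dom_print_concat print_output → Pre_print_concat print_output → Spec_print_concat print_output (print_concat print_output)

-- ===== LEMMAS AND PROOFS =====

theorem pvJoinSnoc (sep x : List Char) : ∀ ps : List (List Char), ps ≠ [] →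
    PySem.Chars.join sep (ps ++ [x]) = PySem.Chars.join sep ps ++ sep ++ x
  | [], h => absurd rfl h
  | [a], _ => by
      simp [PySem.Chars.join_cons_cons, PySem.Chars.join_singleton]
  | a :: b :: rest, _ => by
      have ih := pvJoinSnoc sep x (b :: rest) (by simp)
      simp only [List.cons_append, PySem.Chars.join_cons_cons] at *
      rw [ih]; simp [List.append_assoc]

theorem pvReplaceGo (old new : List Char) (h0 : old ≠ []) :
    ∀ (fuel : Nat) (l acc : List Char), ¬ old <:+: l →
      PySem.Chars.replace.go old new fuel l acc = acc.reverse ++ l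
  | 0, l, acc, _ => by simp [PySem.Chars.replace.go]
  | fuel + 1, [], acc, _ => by simp [PySem.Chars.replace.go]
  | fuel + 1, c :: t, acc, hinf => by
      have hpre : old.isPrefixOf (c :: t) = false := by
        by_contra hc
        exact hinf ((List.isPrefixOf_iff_prefix.mp (by simpa using hc)).isInfix)
      have ht : ¬ old <:+: t := fun h => hinf (h.trans (List.suffix_cons c t).isInfix)
      simp [PySem.Chars.replace.go, hpre, pvReplaceGo old new h0 fuel t (c :: acc) ht]

theorem pvReplaceAbsent (s old new : List Char) (h0 : old ≠ []) (h : ¬ old <:+: s) :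
    PySem.Chars.replace s old new = s := by
  simp [PySem.Chars.replace, h0, pvReplaceGo old new h0 s.length s [] h]

-- A's find-guarded replace equals an unconditional replace
theorem pvRepl (line : String) :
    (if PySem.Str.find line ";;; " ≠ -1 then PySem.Str.replace line ";;; " "comment=" else line)
      = PySem.Str.replace line ";;; " "comment=" := by
  split_ifs with hf
  · rfl
  · rw [not_not] at hf
    symm
    rw [← String.toList_inj, PySem.Str.toList_replace]
    exact pvReplaceAbsent _ _ _ (by decide)
      ((PySem.Chars.find_eq_neg_one_iff _ _).mp (by rw [← PySem.Str.find_eq]; exact hf))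

-- joining a two-element list equals appending the new stripped segment before joining
theorem pvJoinTwo (g : List String) (hg : g ≠ []) (x : String) :
    PySem.Str.join " " [PySem.Str.join " " g, x] = PySem.Str.join " " (g ++ [x]) := by
  rw [← String.toList_inj]
  simp only [PySem.Str.toList_join, List.map_cons, List.map_nil, List.map_append,
    PySem.Str.toList_join, List.map_cons, List.map_nil]
  rw [PySem.Chars.join_cons_cons, PySem.Chars.join_singleton,
    pvJoinSnoc _ _ (g.map String.toList) (by simpa using hg)]

theorem pvJoinSingle (x : String) : PySem.Str.join " " [x] = x := by
  rw [← String.toList_inj]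
  simp [PySem.Str.toList_join, PySem.Chars.join_singleton]

theorem pvLenNe (l : String) (h : l ≠ "") : ¬ PySem.Str.len l = 0 := by
  simp only [PySem.Str.len_eq, Int.natCast_eq_zero, List.length_eq_zero_iff]
  intro h'
  exact h (String.toList_inj.mp (by simp [h']))

-- empty lines are no-ops for A's loop body: folding over the list equals folding over its filter
theorem pvFoldFilter : ∀ (ls : List String) (acc : List String),
    ls.foldl pvStepA acc = (ls.filter (fun l => l ≠ "")).foldl pvStepA acc
  | [], _ => rfl
  | l :: rest, acc => by
      by_cases h : l = ""
      · have hstep : pvStepA acc l = acc := by simp [pvStepA, h, PySem.Str.len]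
        rw [List.foldl_cons, hstep, pvFoldFilter rest acc]
        simp [h]
      · simp [h, List.foldl_cons, pvFoldFilter rest (pvStepA acc l)]

-- span invariant: A's fold, started with a pending record `parts`, produces that record joined
-- with the stripped continuation run, followed by B's records of the remainder
theorem pvMain : ∀ (ls : List String) (acc parts : List String), parts ≠ [] →
    (∀ l ∈ ls, l ≠ "") →
    ls.foldl pvStepA (acc ++ [PySem.Str.join " " parts])
      = acc ++ (PySem.Str.join " " (parts ++ (ls.takeWhile pvContinues).map PySem.Str.strip)
          :: pvRecords (ls.dropWhile pvContinues))
  | [], acc, parts, _, _ => by simp [pvRecords]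
  | l :: rest, acc, parts, hp, hne => by
      have hl : l ≠ "" := hne l (by simp)
      have hlen := pvLenNe l hl
      by_cases hc : pvContinues l = true
      · have hsw : PySem.Str.startswith l "   " = true := hc
        have step : pvStepA (acc ++ [PySem.Str.join " " parts]) l
            = acc ++ [PySem.Str.join " " (parts ++ [PySem.Str.strip l])] := by
          simp only [pvStepA, if_neg hlen, if_pos hsw]
          simp [pvJoinTwo parts hp (PySem.Str.strip l)]
        rw [List.foldl_cons, step,
          pvMain rest acc (parts ++ [PySem.Str.strip l]) (by simp) (fun x hx => hne x (by simp [hx]))]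
        simp [hc, List.append_assoc]
      · have hc' : pvContinues l = false := by simpa using hc
        have hsw : ¬ (PySem.Str.startswith l "   " = true) := by
          intro h; exact hc h
        have step : pvStepA (acc ++ [PySem.Str.join " " parts]) l
            = (acc ++ [PySem.Str.join " " parts])
                ++ [PySem.Str.join " " [PySem.Str.strip (PySem.Str.replace l ";;; " "comment=")]] := by
          simp only [pvStepA, if_neg hlen, if_neg hsw, pvRepl l]
          simp [pvJoinSingle]
        rw [List.foldl_cons, step,
          pvMain rest (acc ++ [PySem.Str.join " " parts])
            [PySem.Str.strip (PySem.Str.replace l ";;; " "comment=")] (by simp)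
            (fun x hx => hne x (by simp [hx]))]
        simp [hc', pvRecords, List.append_assoc]

-- ===== VERDICT =====
theorem print_concat_spec : Claim_equal_print_concat := by
  intro po _ hpre
  unfold Spec_print_concat print_concat print_concat_alt
  rw [pvFoldFilter po []]
  have hmem : ∀ l ∈ po.filter (fun l => l ≠ ""), l ≠ "" := by
    intro l hl
    simpa using (List.of_mem_filter hl)
  unfold Pre_print_concat at hpre
  cases hfl : po.filter (fun l => l ≠ "") with
  | nil => simp [pvRecords]
  | cons l rest =>
    rw [hfl] at hpre hmem
    have hl : l ≠ "" := hmem l (by simp)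
    have hsw : ¬ (PySem.Str.startswith l "   " = true) := by
      simp only [List.head?_cons, Option.all_some, decide_eq_true_eq] at hpre
      exact hpre
    have hc' : pvContinues l = false := Bool.eq_false_iff.mpr hsw
    have step : pvStepA [] l
        = [] ++ [PySem.Str.join " " [PySem.Str.strip (PySem.Str.replace l ";;; " "comment=")]] := by
      simp only [pvStepA, if_neg (pvLenNe l hl), if_neg hsw, pvRepl l]
      simp [pvJoinSingle]
    rw [List.foldl_cons, step,
      pvMain rest [] [PySem.Str.strip (PySem.Str.replace l ";;; " "comment=")] (by simp)
        (fun x hx => hmem x (by simp [hx]))]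
    simp [pvRecords]
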